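-- pv_equiv track=rewrite | github.com/ZorokaJuro540/ShadowRollV5 | modules/text_styling.py | monospace
-- ===== SOURCE A (Python) =====
-- def monospace(text: str) -> str:
--     """Convert text to monospace style"""
--     normal = "ABCDEFGHIJKLMNOPQRSTUVWXYZabcdefghijklmnopqrstuvwxyz0123456789"
--     monospace = "𝙰𝙱𝙲𝙳𝙴𝙵𝙶𝙷𝙸𝙹𝙺𝙻𝙼𝙽𝙾𝙿𝚀𝚁𝚂𝚃𝚄𝚅𝚆𝚇𝚈𝚉𝚊𝚋𝚌𝚍𝚎𝚏𝚐𝚑𝚒𝚓𝚔𝚕𝚖𝚗𝚘𝚙𝚚𝚛𝚜𝚝𝚞𝚟𝚠𝚡𝚢𝚣𝟶𝟷𝟸𝟹𝟺𝟻𝟼𝟽𝟾𝟿"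
--
--     result = ""
--     for char in text:
--         if char in normal:
--             result += monospace[normal.index(char)]
--         else:
--             result += char
--     return result
-- ===== SOURCE B (Python) =====
-- def monospace(text: str) -> str:
--     """Convert text to monospace style"""
--     def mono(char: str) -> str:
--         if 'A' <= char <= 'Z':
--             return chr(ord(char) - ord('A') + 0x1D670)
--         if 'a' <= char <= 'z':
--             return chr(ord(char) - ord('a') + 0x1D68A)
--         if '0' <= char <= '9':
--             return chr(ord(char) - ord('0') + 0x1D7F6)
--         return char
--     return "".join(map(mono, text))
-- ===== Notes on version B (the rewrite author's own statement) =====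
-- stated objective: idiomatic
-- what changed: Replaces the per-character linear search of a 62-char alphabet (and string concatenation) with closed-form codepoint arithmetic on three ranges, joined via map.
import Mathlib
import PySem

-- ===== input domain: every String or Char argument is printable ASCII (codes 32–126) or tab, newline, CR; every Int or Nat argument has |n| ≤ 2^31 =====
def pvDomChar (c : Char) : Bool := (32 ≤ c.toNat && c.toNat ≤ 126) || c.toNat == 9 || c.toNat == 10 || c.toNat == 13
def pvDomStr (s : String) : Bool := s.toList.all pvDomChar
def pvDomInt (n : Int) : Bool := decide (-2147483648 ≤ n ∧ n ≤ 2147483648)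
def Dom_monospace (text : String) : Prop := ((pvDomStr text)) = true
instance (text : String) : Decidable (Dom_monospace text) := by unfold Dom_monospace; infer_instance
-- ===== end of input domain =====

-- B replaces A's per-character linear search of the 62-char alphabet with closed-form codepoint arithmetic.
-- ===== PORT A =====
def monoNormal : List Char := "ABCDEFGHIJKLMNOPQRSTUVWXYZabcdefghijklmnopqrstuvwxyz0123456789".toList
def monoTable : List Char := "𝙰𝙱𝙲𝙳𝙴𝙵𝙶𝙷𝙸𝙹𝙺𝙻𝙼𝙽𝙾𝙿𝚀𝚁𝚂𝚃𝚄𝚅𝚆𝚇𝚈𝚉𝚊𝚋𝚌𝚍𝚎𝚏𝚐𝚑𝚒𝚓𝚔𝚕𝚖𝚗𝚘𝚙𝚚𝚛𝚜𝚝𝚞𝚟𝚠𝚡𝚢𝚣𝟶𝟷𝟸𝟹𝟺𝟻𝟼𝟽𝟾𝟿".toList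

-- 'char in normal' is membership; 'monospace[normal.index(char)]' indexed by list.index
def monospace (text : String) : String :=
  String.ofList <| text.toList.foldl (fun result c =>
    if monoNormal.contains c then
      result ++ [(PySem.List.pyGet? monoTable ((PySem.List.index? monoNormal c).getD 0)).getD c]
    else
      result ++ [c]) []

-- ===== PORT B =====
def monoChar (c : Char) : Char :=
  if 'A' ≤ c ∧ c ≤ 'Z' then Char.ofNat (c.toNat - 'A'.toNat + 0x1D670)
  else if 'a' ≤ c ∧ c ≤ 'z' then Char.ofNat (c.toNat - 'a'.toNat + 0x1D68A)
  else if '0' ≤ c ∧ c ≤ '9' then Char.ofNat (c.toNat - '0'.toNat + 0x1D7F6)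
  else c

def monospace_alt (text : String) : String :=
  String.ofList (text.toList.map monoChar)

-- ===== PRECONDITION & SPEC =====
def Spec_monospace (text : String) (out : String) : Prop := out = monospace_alt text
instance (text : String) (out : String) : Decidable (Spec_monospace text out) := by unfold Spec_monospace; infer_instance

-- ===== CLAIM (what is proved, stated in full; the proofs are below) =====
def Claim_equal_monospace : Prop := ∀ (text : String), Dom_monospace text → Spec_monospace text (monospace text)

-- ===== LEMMAS AND PROOFS =====
-- A's per-character translation, as a single function of the char
def aChar (c : Char) : Char :=
  if monoNormal.contains c then
    (PySem.List.pyGet? monoTable ((PySem.List.index? monoNormal c).getD 0)).getD c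
  else c

set_option maxRecDepth 8192 in
theorem aChar_eq_monoChar_of_lt : ∀ n < 127, aChar (Char.ofNat n) = monoChar (Char.ofNat n) := by
  decide

theorem aChar_eq_monoChar (c : Char) (h : pvDomChar c = true) : aChar c = monoChar c := by
  have hlt : c.toNat < 127 := by
    simp [pvDomChar] at h
    rcases h with ⟨h1 | h2⟩ | h3 <;> omega
  have := aChar_eq_monoChar_of_lt c.toNat hlt
  rwa [Char.ofNat_toNat] at this

-- ===== VERDICT (by name: the statement is the Claim_ definition above) =====
theorem monospace_spec : Claim_equal_monospace := by
  intro text hdom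
  unfold Spec_monospace monospace monospace_alt
  congr 1
  have hstep : (fun (result : List Char) (c : Char) =>
      if monoNormal.contains c then
        result ++ [(PySem.List.pyGet? monoTable ((PySem.List.index? monoNormal c).getD 0)).getD c]
      else result ++ [c]) = (fun result c => result ++ [aChar c]) := by
    funext result c
    unfold aChar
    split <;> rfl
  rw [hstep, PySem.List.foldl_append_singleton_eq_map]
  apply List.map_congr_left
  intro c hc
  have : pvDomChar c = true := by
    unfold Dom_monospace pvDomStr at hdom
    exact List.all_eq_true.mp hdom c hc
  exact aChar_eq_monoChar c this
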